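-- pv_equiv track=rewrite | github.com/anhttdevbm/ai-agent-rekkieedu | cham_bai/reading_gen.py | _split_inline_md_bold_chunks
-- ===== SOURCE A (Python) =====
-- def _split_inline_md_bold_chunks(text: str) -> list[tuple[bool, str]]:
--     """Tách chuỗi theo cặp **…** → [(is_key_term, segment), …]."""
--     if not text:
--         return []
--     parts: list[tuple[bool, str]] = []
--     idx = 0
--     n = len(text)
--     while idx < n:
--         j = text.find("**", idx)
--         if j < 0:
--             parts.append((False, text[idx:]))
--             break
--         if j > idx:
--             parts.append((False, text[idx:j]))
--         k = text.find("**", j + 2)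
--         if k < 0:
--             parts.append((False, text[j:]))
--             break
--         inner = text[j + 2 : k]
--         if inner:
--             parts.append((True, inner))
--         idx = k + 2
--     return parts
-- ===== SOURCE B (Python) =====
-- def _split_inline_md_bold_chunks(text: str) -> list[tuple[bool, str]]:
--     """Single left-to-right character scan: a bold-state flag toggles at each
--     '**' marker; text between markers is buffered and flushed with the state
--     it was read in; an unclosed trailing marker is re-attached verbatim."""
--     parts: list[tuple[bool, str]] = []
--     buf: list[str] = []
--     bold = False
--     i = 0
--     n = len(text)
--     while i < n:
--         if text.startswith("**", i):
--             if buf: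
--                 parts.append((bold, "".join(buf)))
--             buf = []
--             bold = not bold
--             i += 2
--         else:
--             buf.append(text[i])
--             i += 1
--     if bold:
--         parts.append((False, "**" + "".join(buf)))
--     elif buf:
--         parts.append((False, "".join(buf)))
--     return parts
-- ===== Notes on version B (the rewrite author's own statement) =====
-- stated objective: alternative
-- what changed: A jumps between '**' markers with repeated str.find calls and slices out chunks by index pairs; B is a single character-level state machine that buffers text, toggles a bold flag at each '**', and flushes buffers with the flag they were read under (unclosed trailing marker re-attached at the end).
import Mathlib
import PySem

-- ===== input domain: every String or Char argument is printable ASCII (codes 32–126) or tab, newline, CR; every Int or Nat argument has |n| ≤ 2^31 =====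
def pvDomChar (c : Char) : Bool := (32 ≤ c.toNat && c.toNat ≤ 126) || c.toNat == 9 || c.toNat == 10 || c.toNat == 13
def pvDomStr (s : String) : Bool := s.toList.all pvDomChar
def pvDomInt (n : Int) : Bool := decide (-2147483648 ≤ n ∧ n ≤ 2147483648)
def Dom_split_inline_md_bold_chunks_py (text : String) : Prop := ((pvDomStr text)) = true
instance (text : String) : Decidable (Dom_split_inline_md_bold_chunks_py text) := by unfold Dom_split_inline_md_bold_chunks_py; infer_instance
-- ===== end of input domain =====

-- B replaces A's find-and-slice marker jumping by a single character-level state machine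
-- (bold flag toggled at each '**', buffered text flushed under the flag it was read in); alternative decomposition, same cost.


-- ===== PORT A =====
-- A's while loop over the index `idx`; `fuel` only makes the recursion total (it is
-- text.length + 1 at the call and each iteration strictly increases idx, so it never runs out).
-- text.find("**", i) is PySem.Chars.findFrom; the slices text[idx:j], text[j+2:k], text[idx:], text[j:]
-- are (drop …).take … / drop … — exact here since 0 ≤ idx ≤ j and j+2 ≤ k always hold for these finds.
def pvGoA (text : List Char) : Nat → Nat → List (Bool × List Char) → List (Bool × List Char)
  | 0, _, parts => parts
  | fuel + 1, idx, parts =>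
    if idx < text.length then
      let j := PySem.Chars.findFrom text ['*', '*'] (idx : Int)
      if j < 0 then parts ++ [(false, text.drop idx)]
      else
        let jn := j.toNat
        let parts1 := if idx < jn then parts ++ [(false, (text.drop idx).take (jn - idx))] else parts
        let k := PySem.Chars.findFrom text ['*', '*'] ((jn : Int) + 2)
        if k < 0 then parts1 ++ [(false, text.drop jn)]
        else
          let kn := k.toNat
          let inner := (text.drop (jn + 2)).take (kn - (jn + 2))
          let parts2 := if inner = [] then parts1 else parts1 ++ [(true, inner)]
          pvGoA text fuel (kn + 2) parts2
    else parts

def split_inline_md_bold_chunks_py (text : String) : List (Bool × String) :=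
  if text.toList = [] then []
  else (pvGoA text.toList (text.toList.length + 1) 0 []).map (fun p => (p.1, String.ofList p.2))

-- ===== PORT B =====
-- B's while loop: one pass over the characters; state = (bold flag, buffer); text.startswith("**", i)
-- is ['*','*'].isPrefixOf on the remaining characters.
def pvGoB : List Char → Bool → List Char → List (Bool × List Char) → List (Bool × List Char)
  | [], bold, buf, parts =>
      if bold then parts ++ [(false, '*' :: '*' :: buf)]
      else if buf = [] then parts else parts ++ [(false, buf)]
  | c :: rest, bold, buf, parts =>
      if ['*', '*'].isPrefixOf (c :: rest) then
        pvGoB rest.tail (!bold) [] (if buf = [] then parts else parts ++ [(bold, buf)])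
      else
        pvGoB rest bold (buf ++ [c]) parts
  termination_by s => s.length
  decreasing_by all_goals simp [List.length_tail]

def split_inline_md_bold_chunks_py_alt (text : String) : List (Bool × String) :=
  (pvGoB text.toList false [] []).map (fun p => (p.1, String.ofList p.2))

-- ===== PRECONDITION & SPEC =====
def Spec_split_inline_md_bold_chunks_py (text : String) (out : List (Bool × String)) : Prop := out = split_inline_md_bold_chunks_py_alt text
instance (text : String) (out : List (Bool × String)) : Decidable (Spec_split_inline_md_bold_chunks_py text out) := by unfold Spec_split_inline_md_bold_chunks_py; infer_instance

-- ===== CLAIM (what is proved, stated in full; the proofs are below) =====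
def Claim_equal_split_inline_md_bold_chunks_py : Prop := ∀ (text : String), Dom_split_inline_md_bold_chunks_py text → Spec_split_inline_md_bold_chunks_py text (split_inline_md_bold_chunks_py text)

-- ===== LEMMAS AND PROOFS =====

-- A's loop body read off the remaining suffix `s = text.drop idx` (proof-only reformulation).
def pvFA : List Char → List (Bool × List Char) → List (Bool × List Char)
  | s, parts =>
    if hs : s = [] then parts
    else
      let j := PySem.Chars.find s ['*', '*']
      if j < 0 then parts ++ [(false, s)]
      else
        let jn := j.toNat
        let parts1 := if 0 < jn then parts ++ [(false, s.take jn)] else parts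
        let k := PySem.Chars.find (s.drop (jn + 2)) ['*', '*']
        if k < 0 then parts1 ++ [(false, s.drop jn)]
        else
          let kn := k.toNat
          let inner := (s.drop (jn + 2)).take kn
          let parts2 := if inner = [] then parts1 else parts1 ++ [(true, inner)]
          pvFA ((s.drop (jn + 2)).drop (kn + 2)) parts2
  termination_by s => s.length
  decreasing_by
    have := List.length_pos_iff.mpr hs
    simp
    omega

lemma pv_find_go_shift (sub l : List Char) (k : Nat) :
    PySem.Chars.find.go sub l k =
      if PySem.Chars.find l sub = -1 then -1 else (k : Int) + PySem.Chars.find l sub := by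
  induction l generalizing k with
  | nil =>
    simp only [PySem.Chars.find, PySem.Chars.find.go]
    split <;> simp
  | cons c t ih =>
    simp only [PySem.Chars.find, PySem.Chars.find.go]
    by_cases hp : sub.isPrefixOf (c :: t) = true
    · simp [hp]
    · simp only [hp, if_false, Bool.false_eq_true]
      rw [ih (k + 1), ih 1]
      split
      · rfl
      · have := PySem.Chars.neg_one_le_find t sub
        rw [if_neg (by omega)]
        push_cast
        ring

lemma pv_find_cons (sub : List Char) (c : Char) (t : List Char) :
    PySem.Chars.find (c :: t) sub =
      if sub.isPrefixOf (c :: t) then 0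
      else if PySem.Chars.find t sub = -1 then -1 else 1 + PySem.Chars.find t sub := by
  conv_lhs => simp only [PySem.Chars.find, PySem.Chars.find.go]
  by_cases hp : sub.isPrefixOf (c :: t) = true
  · simp [hp]
  · simp only [hp, if_false, Bool.false_eq_true]
    rw [pv_find_go_shift]
    split <;> simp

lemma pv_goB_no_occ (s : List Char) (h : PySem.Chars.find s ['*', '*'] = -1)
    (bold : Bool) (buf : List Char) (parts : List (Bool × List Char)) :
    pvGoB s bold buf parts =
      if bold then parts ++ [(false, '*' :: '*' :: (buf ++ s))]
      else if buf ++ s = [] then parts else parts ++ [(false, buf ++ s)] := by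
  induction s generalizing buf parts with
  | nil => simp [pvGoB]
  | cons c t ih =>
    rw [pv_find_cons] at h
    by_cases hp : (['*', '*'] : List Char).isPrefixOf (c :: t) = true
    · simp [hp] at h
    · have hnil : PySem.Chars.find t ['*', '*'] = -1 := by
        have := PySem.Chars.neg_one_le_find t ['*', '*']
        simp only [hp, if_false, Bool.false_eq_true] at h
        by_contra hc
        rw [if_neg hc] at h
        omega
      rw [pvGoB, if_neg hp, ih hnil]
      simp

lemma pv_goB_occ (s : List Char) (h : 0 ≤ PySem.Chars.find s ['*', '*'])
    (bold : Bool) (buf : List Char) (parts : List (Bool × List Char)) :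
    pvGoB s bold buf parts =
      pvGoB (s.drop ((PySem.Chars.find s ['*', '*']).toNat + 2)) (!bold) []
        (if buf ++ s.take (PySem.Chars.find s ['*', '*']).toNat = [] then parts
         else parts ++ [(bold, buf ++ s.take (PySem.Chars.find s ['*', '*']).toNat)]) := by
  induction s generalizing buf parts with
  | nil => simp [PySem.Chars.find, PySem.Chars.find.go] at h
  | cons c t ih =>
    by_cases hp : (['*', '*'] : List Char).isPrefixOf (c :: t) = true
    · rw [pv_find_cons, if_pos hp]
      rw [pvGoB, if_pos hp]
      obtain ⟨r, hr⟩ : ∃ r, t = '*' :: r := by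
        cases t with
        | nil => simp [List.isPrefixOf] at hp
        | cons d r => simp [List.isPrefixOf] at hp; exact ⟨r, by rw [hp.2]⟩
      subst hr
      simp
    · have hne : PySem.Chars.find t ['*', '*'] ≠ -1 := by
        intro hc
        rw [pv_find_cons, if_neg hp, if_pos hc] at h
        omega
      have hfc : PySem.Chars.find (c :: t) ['*', '*'] = 1 + PySem.Chars.find t ['*', '*'] := by
        rw [pv_find_cons, if_neg hp, if_neg hne]
      have ht : 0 ≤ PySem.Chars.find t ['*', '*'] := by
        have := PySem.Chars.neg_one_le_find t ['*', '*']
        omega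
      rw [pvGoB, if_neg hp, ih ht, hfc]
      have htn : (1 + PySem.Chars.find t ['*', '*']).toNat = (PySem.Chars.find t ['*', '*']).toNat + 1 := by
        omega
      rw [htn]
      simp

lemma pv_fA_eq_goB (s : List Char) (parts : List (Bool × List Char)) :
    pvFA s parts = pvGoB s false [] parts := by
  fun_induction pvFA s parts with
  | case1 parts => simp [pvGoB]
  | case2 s parts hs j hj =>
    have hj' : PySem.Chars.find s ['*', '*'] = -1 := by
      have := PySem.Chars.neg_one_le_find s ['*', '*']
      simp only [j] at hj
      omega
    rw [pv_goB_no_occ s hj']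
    simp [hs]
  | case3 s parts hs j hj jn parts1 k hk =>
    simp only [j, jn, k, parts1] at *
    have hj0 : (0 : Int) ≤ PySem.Chars.find s ['*', '*'] := by omega
    have hk' : PySem.Chars.find (List.drop ((PySem.Chars.find s ['*', '*']).toNat + 2) s) ['*', '*'] = -1 := by
      have := PySem.Chars.neg_one_le_find (List.drop ((PySem.Chars.find s ['*', '*']).toNat + 2) s) ['*', '*']
      omega
    obtain ⟨r, hr⟩ := (PySem.Chars.find_spec hj0).1
    have hdrop2 : List.drop ((PySem.Chars.find s ['*', '*']).toNat + 2) s = r := by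
      rw [← List.drop_drop, ← hr]
      simp
    rw [pv_goB_occ s hj0, pv_goB_no_occ _ hk']
    rw [hdrop2, ← hr]
    by_cases h0 : 0 < PySem.Chars.find s ['*', '*']
    · simp [h0, not_le.mpr h0, List.take_eq_nil_iff, hs, Int.toNat_eq_zero]
    · have hz : PySem.Chars.find s ['*', '*'] = 0 := le_antisymm (not_lt.mp h0) hj0
      simp [hz]
  | case4 s parts hs j hj jn parts1 k hk kn inner parts2 ih =>
    simp only [j, jn, k, kn, parts1, parts2, inner] at *
    have hj0 : (0 : Int) ≤ PySem.Chars.find s ['*', '*'] := by omega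
    have hk0 : (0 : Int) ≤ PySem.Chars.find (List.drop ((PySem.Chars.find s ['*', '*']).toNat + 2) s) ['*', '*'] := by omega
    rw [pv_goB_occ s hj0, pv_goB_occ _ hk0, ih]
    simp only [Bool.not_false, List.nil_append]
    by_cases h1 : List.take (PySem.Chars.find (List.drop ((PySem.Chars.find s ['*', '*']).toNat + 2) s) ['*', '*']).toNat (List.drop ((PySem.Chars.find s ['*', '*']).toNat + 2) s) = [] <;>
      by_cases h0 : 0 < PySem.Chars.find s ['*', '*']
    · simp [h0, not_le.mpr h0, h1, List.take_eq_nil_iff, hs, Int.toNat_eq_zero]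
    · have hz : PySem.Chars.find s ['*', '*'] = 0 := le_antisymm (not_lt.mp h0) hj0
      simp [hz]
    · simp [h0, not_le.mpr h0, h1, List.take_eq_nil_iff, hs, Int.toNat_eq_zero]
    · have hz : PySem.Chars.find s ['*', '*'] = 0 := le_antisymm (not_lt.mp h0) hj0
      simp [hz, List.take_eq_nil_iff]

lemma pv_goA_eq_fA (text : List Char) (fuel idx : Nat) (parts : List (Bool × List Char))
    (h : text.length < idx + fuel) :
    pvGoA text fuel idx parts = pvFA (text.drop idx) parts := by
  induction fuel generalizing idx parts with
  | zero =>
    rw [List.drop_eq_nil_of_le (by omega)]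
    simp [pvGoA, pvFA]
  | succ fuel ih =>
    by_cases hidx : idx < text.length
    · have hidx' : idx ≤ text.length := le_of_lt hidx
      have hne : List.drop idx text ≠ [] := by
        intro hc
        have := congrArg List.length hc
        simp at this
        omega
      rw [pvGoA, pvFA]
      simp only [if_pos hidx, dif_neg hne,
        PySem.Chars.findFrom_natCast text ['*', '*'] idx hidx']
      by_cases hf : PySem.Chars.find (List.drop idx text) ['*', '*'] = -1
      · simp [hf]
      · have hf0 : 0 ≤ PySem.Chars.find (List.drop idx text) ['*', '*'] := by
          have := PySem.Chars.neg_one_le_find (List.drop idx text) ['*', '*']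
          omega
        obtain ⟨r, hr⟩ := (PySem.Chars.find_spec hf0).1
        have hlen2 : idx + (PySem.Chars.find (List.drop idx text) ['*', '*']).toNat + 2 ≤ text.length := by
          have := congrArg List.length hr
          simp at this
          omega
        have hjn : ((idx : Int) + PySem.Chars.find (List.drop idx text) ['*', '*']).toNat
            = idx + (PySem.Chars.find (List.drop idx text) ['*', '*']).toNat := by omega
        have hcast : ((idx + (PySem.Chars.find (List.drop idx text) ['*', '*']).toNat : Nat) : Int) + 2
            = ((idx + (PySem.Chars.find (List.drop idx text) ['*', '*']).toNat + 2 : Nat) : Int) := by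
          push_cast
          ring
        have hdd : List.drop (idx + (PySem.Chars.find (List.drop idx text) ['*', '*']).toNat + 2) text
            = List.drop ((PySem.Chars.find (List.drop idx text) ['*', '*']).toNat + 2) (List.drop idx text) := by
          rw [List.drop_drop]
          congr 1
        have hdd0 : List.drop (idx + (PySem.Chars.find (List.drop idx text) ['*', '*']).toNat) text
            = List.drop (PySem.Chars.find (List.drop idx text) ['*', '*']).toNat (List.drop idx text) := by
          rw [List.drop_drop]
        simp only [if_neg hf, if_neg (show ¬ ((idx : Int) + PySem.Chars.find (List.drop idx text) ['*', '*'] < 0) by omega),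
          if_neg (show ¬ PySem.Chars.find (List.drop idx text) ['*', '*'] < 0 by omega),
          hjn, hcast, PySem.Chars.findFrom_natCast text ['*', '*'] _ hlen2, hdd, hdd0,
          Nat.add_sub_cancel_left, lt_add_iff_pos_right]
        by_cases hg : PySem.Chars.find (List.drop ((PySem.Chars.find (List.drop idx text) ['*', '*']).toNat + 2) (List.drop idx text)) ['*', '*'] = -1
        · simp only [hg]
          norm_num
        · have hg0 : 0 ≤ PySem.Chars.find (List.drop ((PySem.Chars.find (List.drop idx text) ['*', '*']).toNat + 2) (List.drop idx text)) ['*', '*'] := by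
            have := PySem.Chars.neg_one_le_find (List.drop ((PySem.Chars.find (List.drop idx text) ['*', '*']).toNat + 2) (List.drop idx text)) ['*', '*']
            omega
          have hkn : (((idx + (PySem.Chars.find (List.drop idx text) ['*', '*']).toNat + 2 : Nat) : Int)
              + PySem.Chars.find (List.drop ((PySem.Chars.find (List.drop idx text) ['*', '*']).toNat + 2) (List.drop idx text)) ['*', '*']).toNat
              = idx + (PySem.Chars.find (List.drop idx text) ['*', '*']).toNat + 2
                + (PySem.Chars.find (List.drop ((PySem.Chars.find (List.drop idx text) ['*', '*']).toNat + 2) (List.drop idx text)) ['*', '*']).toNat := by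
            omega
          have hddr : List.drop (idx + (PySem.Chars.find (List.drop idx text) ['*', '*']).toNat + 2
                + (PySem.Chars.find (List.drop ((PySem.Chars.find (List.drop idx text) ['*', '*']).toNat + 2) (List.drop idx text)) ['*', '*']).toNat + 2) text
              = List.drop ((PySem.Chars.find (List.drop ((PySem.Chars.find (List.drop idx text) ['*', '*']).toNat + 2) (List.drop idx text)) ['*', '*']).toNat + 2)
                  (List.drop ((PySem.Chars.find (List.drop idx text) ['*', '*']).toNat + 2) (List.drop idx text)) := by
            rw [List.drop_drop, List.drop_drop]
            congr 1
          have hrec : ∀ p : List (Bool × List Char),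
              pvGoA text fuel (idx + (PySem.Chars.find (List.drop idx text) ['*', '*']).toNat + 2
                + (PySem.Chars.find (List.drop ((PySem.Chars.find (List.drop idx text) ['*', '*']).toNat + 2) (List.drop idx text)) ['*', '*']).toNat + 2) p
              = pvFA (List.drop (idx + (PySem.Chars.find (List.drop idx text) ['*', '*']).toNat + 2
                + (PySem.Chars.find (List.drop ((PySem.Chars.find (List.drop idx text) ['*', '*']).toNat + 2) (List.drop idx text)) ['*', '*']).toNat + 2) text) p :=
            fun p => ih _ p (by omega)
          simp only [if_neg hg,
            if_neg (show ¬ (((idx + (PySem.Chars.find (List.drop idx text) ['*', '*']).toNat + 2 : Nat) : Int)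
              + PySem.Chars.find (List.drop ((PySem.Chars.find (List.drop idx text) ['*', '*']).toNat + 2) (List.drop idx text)) ['*', '*'] < 0) by omega),
            if_neg (show ¬ PySem.Chars.find (List.drop ((PySem.Chars.find (List.drop idx text) ['*', '*']).toNat + 2) (List.drop idx text)) ['*', '*'] < 0 by omega),
            hkn, Nat.add_sub_cancel_left, hrec, hddr]
    · rw [pvGoA, if_neg hidx, List.drop_eq_nil_of_le (by omega)]
      simp [pvFA]

-- ===== VERDICT (by name: the statement is the Claim_ definition above) =====
theorem split_inline_md_bold_chunks_py_spec : Claim_equal_split_inline_md_bold_chunks_py := by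
  intro text _
  unfold Spec_split_inline_md_bold_chunks_py split_inline_md_bold_chunks_py split_inline_md_bold_chunks_py_alt
  by_cases h : text.toList = []
  · simp [h, pvGoB]
  · rw [if_neg h, pv_goA_eq_fA _ _ _ _ (by omega), List.drop_zero, pv_fA_eq_goB]
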